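-- pv_equiv track=rewrite | github.com/swwho96/algo | programmers/Level_2/ParkingFee.py | ParkingTime
-- ===== SOURCE A (Python) =====
-- def ParkingTime(time_list:list)->int:
--     parking_time = 0
--     if len(time_list) % 2 != 0:
--         time_list.append('23:59')
--     for i in range(1,len(time_list),2):
--         IN = list(map(int, time_list[i-1].split(':')))
--         OUT = list(map(int, time_list[i].split(':')))
--         if OUT[1] < IN[1]:
--             OUT[0], OUT[1] = OUT[0]-1, OUT[1]+60
--         parking_time += (OUT[0]-IN[0])*60 + OUT[1]-IN[1]
--     return parking_time
-- ===== SOURCE B (Python) =====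
-- def ParkingTime(time_list: list) -> int:
--     if len(time_list) % 2 != 0:
--         time_list.append('23:59')
--     total = 0
--     for i, t in enumerate(time_list):
--         vals = list(map(int, t.split(':')))
--         minutes = vals[0] * 60 + vals[1]
--         total += minutes if i % 2 else -minutes
--     return total
-- ===== Notes on version B (the rewrite author's own statement) =====
-- stated objective: simpler
-- what changed: Replaces the per-pair loop with its minute-borrow branch by a single per-element pass that converts each timestamp to total minutes and accumulates a parity-signed sum (subtract at even indices, add at odd), the borrow branch being a provable no-op.
import Mathlib
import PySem

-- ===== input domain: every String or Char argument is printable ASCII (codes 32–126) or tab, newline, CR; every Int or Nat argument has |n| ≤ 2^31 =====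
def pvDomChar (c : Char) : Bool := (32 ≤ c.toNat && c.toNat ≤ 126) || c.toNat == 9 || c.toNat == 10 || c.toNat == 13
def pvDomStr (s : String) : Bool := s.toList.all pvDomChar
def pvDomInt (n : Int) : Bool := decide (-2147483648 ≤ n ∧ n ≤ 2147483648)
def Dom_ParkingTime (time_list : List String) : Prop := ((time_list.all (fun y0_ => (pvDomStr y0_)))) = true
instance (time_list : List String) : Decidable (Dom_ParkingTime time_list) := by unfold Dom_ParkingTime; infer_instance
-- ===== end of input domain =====

-- B replaces A's per-pair loop (with its borrow branch, a provable no-op) by one per-element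
-- pass accumulating a parity-signed sum of each timestamp's total minutes: simpler, same cost.
-- A mutates its argument (appends '23:59' on odd length); B performs the same mutation;
-- the equivalence proved here is about the return value.

-- ===== PORT A =====
def ParkingTime (time_list : List String) : Int :=
  let tl := if time_list.length % 2 ≠ 0 then time_list ++ ["23:59"] else time_list
  (PySem.List.pyRange 1 (tl.length : Int) 2).foldl
    (fun parking_time i =>
      let IN := ((PySem.Str.split? (PySem.List.pyGetD tl (i - 1) "") ":").getD []).map
                  (fun t => (PySem.Int.ofStr? t).getD 0)
      let OUT := ((PySem.Str.split? (PySem.List.pyGetD tl i "") ":").getD []).map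
                  (fun t => (PySem.Int.ofStr? t).getD 0)
      let o : Int × Int :=
        if PySem.List.pyGetD OUT 1 0 < PySem.List.pyGetD IN 1 0 then
          (PySem.List.pyGetD OUT 0 0 - 1, PySem.List.pyGetD OUT 1 0 + 60)
        else (PySem.List.pyGetD OUT 0 0, PySem.List.pyGetD OUT 1 0)
      parking_time + (o.1 - PySem.List.pyGetD IN 0 0) * 60 + o.2 - PySem.List.pyGetD IN 1 0)
    0

-- ===== PORT B =====
-- total minutes of one 'h:m' timestamp: vals[0]*60 + vals[1]
def pvMinutes (t : String) : Int :=
  let vals := ((PySem.Str.split? t ":").getD []).map (fun u => (PySem.Int.ofStr? u).getD 0)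
  PySem.List.pyGetD vals 0 0 * 60 + PySem.List.pyGetD vals 1 0

def ParkingTime_alt (time_list : List String) : Int :=
  let tl := if time_list.length % 2 ≠ 0 then time_list ++ ["23:59"] else time_list
  (PySem.List.enumerate tl 0).foldl
    (fun total p =>
      total + (if PySem.Int.mod p.1 2 ≠ 0 then pvMinutes p.2 else -pvMinutes p.2))
    0

-- ===== PRECONDITION & SPEC =====
-- Pre_ excludes exactly the inputs on which the Python A raises: an element whose ':'-split
-- has fewer than two fields (IndexError) or a field int() rejects (ValueError).
def Pre_ParkingTime (time_list : List String) : Prop :=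
  ∀ s ∈ time_list,
    2 ≤ ((PySem.Str.split? s ":").getD []).length ∧
    ∀ t ∈ (PySem.Str.split? s ":").getD [], (PySem.Int.ofStr? t).isSome = true
instance (time_list : List String) : Decidable (Pre_ParkingTime time_list) := by
  unfold Pre_ParkingTime; infer_instance

def pvWitness_ParkingTime : List String := ["09:12", "14:30", "18:59"]

def Spec_ParkingTime (time_list : List String) (out : Int) : Prop := out = ParkingTime_alt time_list
instance (time_list : List String) (out : Int) : Decidable (Spec_ParkingTime time_list out) := by unfold Spec_ParkingTime; infer_instance

-- ===== CLAIM (what is proved, stated in full; the proofs are below) =====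
def Claim_equal_ParkingTime : Prop := ∀ (time_list : List String), Dom_ParkingTime time_list → Pre_ParkingTime time_list → Spec_ParkingTime time_list (ParkingTime time_list)

-- ===== LEMMAS AND PROOFS =====
def pvPairSum : List String → Int
  | a :: b :: r => (pvMinutes b - pvMinutes a) + pvPairSum r
  | _ => 0
theorem pvsum_pairs : ∀ (l : List String), l.length % 2 = 0 →
    ((List.range (l.length / 2)).map (fun (k : Nat) =>
        pvMinutes (PySem.List.pyGetD l (1 + 2*(k:Int)) "") -
        pvMinutes (PySem.List.pyGetD l (1 + 2*(k:Int) - 1) ""))).sum = pvPairSum l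
  | [], _ => by simp [pvPairSum]
  | [a], h => by simp at h
  | a :: b :: r, h => by
    have hr : r.length % 2 = 0 := by simp at h; omega
    have hlen : (a :: b :: r).length / 2 = r.length / 2 + 1 := by simp; omega
    rw [hlen, List.range_succ_eq_map, List.map_cons, List.sum_cons, List.map_map]
    have h0 : pvMinutes (PySem.List.pyGetD (a :: b :: r) (1 + 2*((0:Nat):Int)) "") -
        pvMinutes (PySem.List.pyGetD (a :: b :: r) (1 + 2*((0:Nat):Int) - 1) "")
        = pvMinutes b - pvMinutes a := by
      have f1 : (1 + 2*((0:Nat):Int)) = ((1:Nat):Int) := by norm_num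
      have f2 : (1 + 2*((0:Nat):Int) - 1) = ((0:Nat):Int) := by norm_num
      rw [f2, f1, PySem.List.pyGetD_natCast, PySem.List.pyGetD_natCast]
      simp [List.getD]
    have hs : ∀ k : Nat,
        (pvMinutes (PySem.List.pyGetD (a :: b :: r) (1 + 2*((Nat.succ k : Nat):Int)) "") -
         pvMinutes (PySem.List.pyGetD (a :: b :: r) (1 + 2*((Nat.succ k : Nat):Int) - 1) ""))
        = pvMinutes (PySem.List.pyGetD r (1 + 2*(k:Int)) "") -
          pvMinutes (PySem.List.pyGetD r (1 + 2*(k:Int) - 1) "") := by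
      intro k
      have e1 : (1 + 2*((Nat.succ k : Nat):Int)) = ((2*k+3 : Nat) : Int) := by push_cast; ring
      have e2 : (1 + 2*((Nat.succ k : Nat):Int) - 1) = ((2*k+2 : Nat) : Int) := by push_cast; ring
      have e3 : (1 + 2*((k:Nat):Int)) = ((2*k+1 : Nat) : Int) := by push_cast; ring
      have e4 : (1 + 2*((k:Nat):Int) - 1) = ((2*k : Nat) : Int) := by push_cast; ring
      rw [e2, e1, e4, e3, PySem.List.pyGetD_natCast, PySem.List.pyGetD_natCast,
          PySem.List.pyGetD_natCast, PySem.List.pyGetD_natCast]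
      simp [List.getD]
    rw [pvPairSum, ← pvsum_pairs r hr]
    simp only [Function.comp_def, hs, h0]
theorem pvA_loop (tl : List String) (h : tl.length % 2 = 0) :
    (PySem.List.pyRange 1 (tl.length : Int) 2).foldl
      (fun parking_time i =>
        let IN := ((PySem.Str.split? (PySem.List.pyGetD tl (i - 1) "") ":").getD []).map
                    (fun t => (PySem.Int.ofStr? t).getD 0)
        let OUT := ((PySem.Str.split? (PySem.List.pyGetD tl i "") ":").getD []).map
                    (fun t => (PySem.Int.ofStr? t).getD 0)
        let o : Int × Int :=
          if PySem.List.pyGetD OUT 1 0 < PySem.List.pyGetD IN 1 0 then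
            (PySem.List.pyGetD OUT 0 0 - 1, PySem.List.pyGetD OUT 1 0 + 60)
          else (PySem.List.pyGetD OUT 0 0, PySem.List.pyGetD OUT 1 0)
        parking_time + (o.1 - PySem.List.pyGetD IN 0 0) * 60 + o.2 - PySem.List.pyGetD IN 1 0)
      0 = pvPairSum tl := by
  rw [PySem.List.pyRange_of_pos 1 (tl.length : Int) (by norm_num)]
  have hcount : (if (1:Int) < (tl.length : Int) then
      (((tl.length : Int) - 1 + 2 - 1) / 2).toNat else 0) = tl.length / 2 := by
    split_ifs with hlt <;> omega
  rw [hcount, List.foldl_map]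
  have hfun : (fun (parking_time : Int) (k : Nat) =>
      let IN := ((PySem.Str.split? (PySem.List.pyGetD tl (1 + 2*(k:Int) - 1) "") ":").getD []).map
                  (fun t => (PySem.Int.ofStr? t).getD 0)
      let OUT := ((PySem.Str.split? (PySem.List.pyGetD tl (1 + 2*(k:Int)) "") ":").getD []).map
                  (fun t => (PySem.Int.ofStr? t).getD 0)
      let o : Int × Int :=
        if PySem.List.pyGetD OUT 1 0 < PySem.List.pyGetD IN 1 0 then
          (PySem.List.pyGetD OUT 0 0 - 1, PySem.List.pyGetD OUT 1 0 + 60)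
        else (PySem.List.pyGetD OUT 0 0, PySem.List.pyGetD OUT 1 0)
      parking_time + (o.1 - PySem.List.pyGetD IN 0 0) * 60 + o.2 - PySem.List.pyGetD IN 1 0)
      = (fun (acc : Int) (k : Nat) =>
          acc + (pvMinutes (PySem.List.pyGetD tl (1 + 2*(k:Int)) "") -
                 pvMinutes (PySem.List.pyGetD tl (1 + 2*(k:Int) - 1) ""))) := by
    funext acc k
    dsimp only [pvMinutes]
    split_ifs <;> ring
  rw [hfun, PySem.List.foldl_add, zero_add, pvsum_pairs tl h]
theorem pvB_loop : ∀ (l : List String) (s acc : Int), PySem.Int.mod s 2 = 0 → l.length % 2 = 0 →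
    (PySem.List.enumerate l s).foldl
      (fun total p =>
        total + (if PySem.Int.mod p.1 2 ≠ 0 then pvMinutes p.2 else -pvMinutes p.2))
      acc = acc + pvPairSum l
  | [], _, _, _, _ => by simp [pvPairSum, PySem.List.enumerate_nil]
  | [_], _, _, _, h => by simp at h
  | a :: b :: r, s, acc, hs, h => by
    rw [PySem.List.enumerate_cons, PySem.List.enumerate_cons, List.foldl_cons, List.foldl_cons]
    have h2 : PySem.Int.mod (s + 1) 2 ≠ 0 := by
      rw [PySem.Int.mod_eq_emod_of_pos (by norm_num)] at hs ⊢; omega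
    have h3 : PySem.Int.mod (s + 1 + 1) 2 = 0 := by
      rw [PySem.Int.mod_eq_emod_of_pos (by norm_num)] at hs ⊢; omega
    have hr : r.length % 2 = 0 := by simp at h; omega
    rw [if_neg (not_not_intro hs), if_pos h2, pvB_loop r (s + 1 + 1) _ h3 hr, pvPairSum]
    ring

-- ===== VERDICT (by name: the statement is the Claim_ definition above) =====
theorem ParkingTime_spec : Claim_equal_ParkingTime := by
  intro l _dom _pre
  unfold Spec_ParkingTime ParkingTime ParkingTime_alt
  dsimp only
  generalize hg : (if l.length % 2 ≠ 0 then l ++ ["23:59"] else l) = tl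
  have htl : tl.length % 2 = 0 := by
    rw [← hg]; split_ifs with hc
    · simp; omega
    · omega
  exact (pvA_loop tl htl).trans ((pvB_loop tl 0 0 (by decide) htl).trans (zero_add _)).symm
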